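-- pv_equiv track=rewrite | github.com/yongmin01/Algorithm | Programmers/n^2 배열 자르기.py | solution
-- ===== SOURCE A (Python) =====
-- def solution(n, left, right):
--     answer = []
--     left_row = left // n
--     left_col = left % n
--     right_row = right // n
--     right_col = right % n
--
--     if left_row == right_row : # left와 right가 같은 행일 때
--         for c in range(left_col, right_col+1) : # left의 열부터 right의 열까지만 돌면 됨
--             answer.append(c+1 if c >= left_row else left_row+1)
--         return answer
--
--     for r in range(left_row, right_row+1) : # left와 right가 다른 행에 위치할 때 (left의 행 < right의 행)
--         if r == left_row : # 현재 행이 left가 위치한 행일 경우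
--             for c in range(left_col, n) : # 열은 left가 위치한 열부터 n까지 돌기
--                 answer.append(r+1 if r >= c else c+1)
--         elif r < right_row :
--             for c in range(n) :
--                 answer.append(r+1 if r >= c else c+1)
--         else : # 현재 행이 right가 위치한 행일 경우
--             for c in range(right_col+1) : # 열은 0부터 right의 열까지만 순회
--                 answer.append(r+1 if r >= c else c+1)
--     return answer
-- ===== SOURCE B (Python) =====
-- def solution(n, left, right):
--     return [max(i // n, i % n) + 1 for i in range(left, right + 1)]
-- ===== Notes on version B (the rewrite author's own statement) =====
-- stated objective: simpler
-- what changed: B replaces A's per-row case analysis (same-row special case plus first/middle/last-row branches with different column bounds) by a single uniform pass over the linear index range, computing max(i//n, i%n)+1 for each i in [left, right].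
-- outside the precondition, e.g. on solution(0, 0, 3): A raises ZeroDivisionError, B raises ZeroDivisionError; on solution(-6, -15, -11): A returns [], B returns [3, 3, 3, 3, 2]
import Mathlib
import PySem

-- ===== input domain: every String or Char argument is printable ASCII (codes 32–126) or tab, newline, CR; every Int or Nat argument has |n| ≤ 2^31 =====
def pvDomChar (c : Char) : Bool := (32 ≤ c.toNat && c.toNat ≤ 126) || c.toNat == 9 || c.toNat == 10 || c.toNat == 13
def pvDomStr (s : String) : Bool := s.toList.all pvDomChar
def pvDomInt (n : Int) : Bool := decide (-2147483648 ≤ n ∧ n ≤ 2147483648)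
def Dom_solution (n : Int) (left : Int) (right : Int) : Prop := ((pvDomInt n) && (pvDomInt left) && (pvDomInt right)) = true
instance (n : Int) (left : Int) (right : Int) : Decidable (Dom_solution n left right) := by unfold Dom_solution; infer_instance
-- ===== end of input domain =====

-- B replaces A's per-row branching by one uniform map max(i//n,i%n)+1 over the linear index range (objective: simpler).


-- ===== PORT A =====
def solution (n : Int) (left : Int) (right : Int) : List Int :=
  let answer : List Int := []
  let left_row := PySem.Int.floordiv left n
  let left_col := PySem.Int.mod left n
  let right_row := PySem.Int.floordiv right n
  let right_col := PySem.Int.mod right n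
  if left_row = right_row then
    (PySem.List.pyRange left_col (right_col + 1) 1).foldl
      (fun answer c => answer ++ [if c ≥ left_row then c + 1 else left_row + 1]) answer
  else
    (PySem.List.pyRange left_row (right_row + 1) 1).foldl
      (fun answer r =>
        if r = left_row then
          (PySem.List.pyRange left_col n 1).foldl
            (fun answer c => answer ++ [if r ≥ c then r + 1 else c + 1]) answer
        else if r < right_row then
          (PySem.List.pyRange 0 n 1).foldl
            (fun answer c => answer ++ [if r ≥ c then r + 1 else c + 1]) answer
        else
          (PySem.List.pyRange 0 (right_col + 1) 1).foldl
            (fun answer c => answer ++ [if r ≥ c then r + 1 else c + 1]) answer) answer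

-- ===== PORT B =====
def solution_alt (n : Int) (left : Int) (right : Int) : List Int :=
  (PySem.List.pyRange left (right + 1) 1).map
    (fun i => max (PySem.Int.floordiv i n) (PySem.Int.mod i n) + 1)

-- ===== PRECONDITION & SPEC =====
-- Pre_ excludes n ≤ 0: n = 0 makes A raise ZeroDivisionError, and n < 0 lies outside the task's
-- natural domain (n is the side length of an n×n grid), where A's per-row column ranges are vacuous
-- artefacts of its implementation.
def Pre_solution (n : Int) (left : Int) (right : Int) : Prop := 0 < n
instance (n : Int) (left : Int) (right : Int) : Decidable (Pre_solution n left right) := by unfold Pre_solution; infer_instance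
def pvWitness_solution : Int × Int × Int := (3, 2, 5)
def Spec_solution (n : Int) (left : Int) (right : Int) (out : List Int) : Prop := out = solution_alt n left right
instance (n : Int) (left : Int) (right : Int) (out : List Int) : Decidable (Spec_solution n left right out) := by unfold Spec_solution; infer_instance

-- ===== CLAIM (what is proved, stated in full; the proofs are below) =====
def Claim_equal_solution : Prop := ∀ (n : Int) (left : Int) (right : Int), Dom_solution n left right → Pre_solution n left right → Spec_solution n left right (solution n left right)

-- ===== LEMMAS AND PROOFS =====

-- if-then-else of A's cell rule is max
lemma pv_ite_max (r c : Int) : (if r ≥ c then r + 1 else c + 1) = max r c + 1 := by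
  rw [max_def]; split_ifs <;> omega

lemma pv_div_mod_split (n row c : Int) (hn : 0 < n) (hc0 : 0 ≤ c) (hcn : c < n) :
    PySem.Int.floordiv (row * n + c) n = row ∧ PySem.Int.mod (row * n + c) n = c := by
  rw [PySem.Int.floordiv_eq_ediv_of_pos hn, PySem.Int.mod_eq_emod_of_pos hn]
  constructor
  · rw [show row * n + c = c + row * n by ring,
      Int.add_mul_ediv_right _ _ (by omega : n ≠ 0), Int.ediv_eq_zero_of_lt hc0 hcn]
    ring
  · rw [show row * n + c = c + row * n by ring, Int.add_mul_emod_self_right ..]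
    exact Int.emod_eq_of_lt hc0 hcn

-- one row segment: B's uniform map over [row*n+a, row*n+b) equals the per-row map over columns [a, b)
lemma pv_seg (n row a b : Int) (hn : 0 < n) (ha : 0 ≤ a) (hb : b ≤ n) :
    (PySem.List.pyRange (row * n + a) (row * n + b) 1).map
      (fun i => max (PySem.Int.floordiv i n) (PySem.Int.mod i n) + 1)
    = (PySem.List.pyRange a b 1).map (fun c => max row c + 1) := by
  rw [PySem.List.pyRange_one, PySem.List.pyRange_one]
  have hlen : (row * n + b - (row * n + a)).toNat = (b - a).toNat := by congr 1; ring
  rw [hlen, List.map_map, List.map_map]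
  apply List.map_congr_left
  intro k hk
  have hk' : (k : Int) < b - a := by have := List.mem_range.mp hk; omega
  simp only [Function.comp]
  rw [show row * n + a + (k : Int) = row * n + (a + k) by ring]
  obtain ⟨hd, hm⟩ := pv_div_mod_split n row (a + k) hn (by omega) (by omega)
  rw [hd, hm]

-- full middle rows: B's map over [s*n, t*n) equals concatenation of full row segments for rows [s, t)
lemma pv_mid (n : Int) (hn : 0 < n) : ∀ (k : Nat) (s t : Int), (t - s).toNat = k →
    (PySem.List.pyRange (s * n) (t * n) 1).map
      (fun i => max (PySem.Int.floordiv i n) (PySem.Int.mod i n) + 1)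
    = (PySem.List.pyRange s t 1).flatMap
        (fun row => (PySem.List.pyRange 0 n 1).map (fun c => max row c + 1)) := by
  intro k
  induction k with
  | zero =>
    intro s t hk
    have hts : t ≤ s := by omega
    rw [PySem.List.pyRange_one_eq_nil (mul_le_mul_of_nonneg_right hts (le_of_lt hn)),
      PySem.List.pyRange_one_eq_nil hts]
    simp
  | succ m ih =>
    intro s t hk
    have hst : s < t := by omega
    have h1 : s * n ≤ (s + 1) * n := mul_le_mul_of_nonneg_right (by omega) (le_of_lt hn)
    have h2 : (s + 1) * n ≤ t * n := mul_le_mul_of_nonneg_right (by omega) (le_of_lt hn)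
    rw [PySem.List.pyRange_one_append (s * n) ((s + 1) * n) (t * n) h1 h2, List.map_append,
      PySem.List.pyRange_one_cons hst, List.flatMap_cons,
      show s * n = s * n + 0 by ring, show (s + 1) * n = s * n + n by ring,
      pv_seg n s 0 n hn le_rfl le_rfl,
      show s * n + n = (s + 1) * n by ring,
      ih (s + 1) t (by omega)]

-- ===== VERDICT (by name: the statement is the Claim_ definition above) =====
theorem solution_spec : Claim_equal_solution := by
  intro n l r _ hnP
  have hn : 0 < n := hnP
  unfold Spec_solution solution solution_alt
  simp only []
  set lr := PySem.Int.floordiv l n with hlr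
  set lc := PySem.Int.mod l n with hlc
  set rr := PySem.Int.floordiv r n with hrr
  set rc := PySem.Int.mod r n with hrc
  have hl : lr * n + lc = l := PySem.Int.floordiv_mul_add_mod l n
  have hr : rr * n + rc = r := PySem.Int.floordiv_mul_add_mod r n
  have hlc0 : 0 ≤ lc := by rw [hlc, PySem.Int.mod_eq_emod_of_pos hn]; exact Int.emod_nonneg l (by omega)
  have hlcn : lc < n := by rw [hlc, PySem.Int.mod_eq_emod_of_pos hn]; exact Int.emod_lt_of_pos l hn
  have hrc0 : 0 ≤ rc := by rw [hrc, PySem.Int.mod_eq_emod_of_pos hn]; exact Int.emod_nonneg r (by omega)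
  have hrcn : rc < n := by rw [hrc, PySem.Int.mod_eq_emod_of_pos hn]; exact Int.emod_lt_of_pos r hn
  clear_value lr lc rr rc
  by_cases hrow : lr = rr
  · -- same row
    subst hrow
    rw [if_pos rfl, PySem.List.foldl_append_singleton_eq_map, List.nil_append,
      show l = lr * n + lc from hl.symm, show r + 1 = lr * n + (rc + 1) by omega,
      pv_seg n lr lc (rc + 1) hn hlc0 (by omega)]
    apply List.map_congr_left
    intro c _
    rw [pv_ite_max c lr, max_comm]
  · rw [if_neg hrow]
    rcases lt_or_gt_of_ne hrow with hlt | hgt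
    · -- left_row < right_row
      -- decompose A's row loop: first row, middle rows, last row
      rw [PySem.List.pyRange_one_succ_right (le_of_lt hlt), PySem.List.pyRange_one_cons hlt,
        List.foldl_append, List.foldl_cons, List.foldl_cons, List.foldl_nil]
      rw [if_neg (by omega : ¬ rr = lr), if_neg (lt_irrefl rr), if_pos (rfl : lr = lr)]
      simp only [PySem.List.foldl_append_singleton_eq_map, List.nil_append]
      rw [PySem.List.foldl_congr_mem' _ _
        (fun acc x => acc ++ (PySem.List.pyRange 0 n 1).map (fun c => if x ≥ c then x + 1 else c + 1)) _
        (by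
          intro x hx acc
          obtain ⟨hx1, hx2⟩ := (PySem.List.mem_pyRange_one).mp hx
          rw [if_neg (by omega : ¬ x = lr), if_pos hx2])]
      rw [PySem.List.foldl_append_eq_flatMap]
      -- decompose B's index range at the row boundaries
      have hb1 : l ≤ (lr + 1) * n := by linarith
      have hb2 : (lr + 1) * n ≤ rr * n := mul_le_mul_of_nonneg_right (by omega) (le_of_lt hn)
      have hb3 : rr * n ≤ r + 1 := by linarith
      rw [PySem.List.pyRange_one_append l (rr * n) (r + 1) (by linarith) hb3,
        PySem.List.pyRange_one_append l ((lr + 1) * n) (rr * n) hb1 hb2,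
        List.map_append, List.map_append,
        show l = lr * n + lc from hl.symm, show (lr + 1) * n = lr * n + n by ring,
        pv_seg n lr lc n hn hlc0 le_rfl,
        show lr * n + n = (lr + 1) * n by ring,
        pv_mid n hn (rr - (lr + 1)).toNat (lr + 1) rr rfl,
        show rr * n = rr * n + 0 by ring, show r + 1 = rr * n + (rc + 1) by omega,
        pv_seg n rr 0 (rc + 1) hn le_rfl (by omega)]
      simp only [pv_ite_max]
    · -- left_row > right_row: both sides empty
      have h1 : rr + 1 ≤ lr := by omega
      have h2 : (rr + 1) * n ≤ lr * n := mul_le_mul_of_nonneg_right h1 (le_of_lt hn)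
      rw [PySem.List.pyRange_one_eq_nil h1, PySem.List.pyRange_one_eq_nil (by linarith : r + 1 ≤ l)]
      simp
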